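-- pv_equiv track=rewrite | github.com/omriz/coding_questions | 331.py | sums_flips
-- ===== SOURCE A (Python) =====
-- def sums_flips(s):
--     "Really good"
--     if len(s) <= 1:
--         return 0
--     sums = [0]*len(s)
--     if s[0] == 'x':
--         sums[0] = 1
--     else:
--         sums[0] = -1
--     for i in range(1,len(s)):
--         if s[i] == 'x':
--             sums[i] = sums[i-1] + 1
--         else:
--             sums[i] = sums[i-1] - 1
--     m = sums[0]
--     max_place = 0
--     for i,v in enumerate(sums):
--         if v > m:
--             m = v
--             max_place = i
--     j=0
--     flips = []
--     if m > 0: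
--         while j <= max_place:
--             if s[j] == 'y':
--                 flips.append(j)
--             j += 1
--         j=len(s)-1
--         while j > max_place:
--             if s[j] == 'x':
--                 flips.append(j)
--             j -= 1
--     if m < 0:
--         while j < len(s):
--             if s[j] == 'x':
--                 flips.append(j)
--             j += 1
--     return sorted(flips)
-- ===== SOURCE B (Python) =====
-- def sums_flips(s):
--     "Really good"
--     if len(s) <= 1:
--         return 0
--     bal = 0
--     m = None
--     ys = []        # 'y' indices at or before the current best prefix end
--     pend = []      # 'y' indices seen after the current best prefix end
--     xs_after = []  # 'x' indices seen after the current best prefix end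
--     xs_all = []    # every 'x' index
--     for i, c in enumerate(s):
--         if c == 'x':
--             bal += 1
--             xs_all.append(i)
--             xs_after.append(i)
--         else:
--             bal -= 1
--             if c == 'y':
--                 pend.append(i)
--         if m is None or bal > m:
--             m = bal
--             ys += pend
--             pend = []
--             xs_after = []
--     if m > 0:
--         return ys + xs_after
--     if m < 0:
--         return xs_all
--     return []
-- ===== Notes on version B (the rewrite author's own statement) =====
-- stated objective: simpler
-- what changed: B drops A's materialised prefix-sum array, separate max pass, two opposite-direction while loops and final sorted(): it keeps the candidate flip lists themselves (y's up to the best prefix end, pending y's, x's after it, all x's) as the state of one loop, emptying/merging them whenever the running balance reaches a new maximum, and returns the right pair already in order.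
-- outside the precondition, e.g. on sums_flips('x'): A returns 0, B returns 0
import Mathlib
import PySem

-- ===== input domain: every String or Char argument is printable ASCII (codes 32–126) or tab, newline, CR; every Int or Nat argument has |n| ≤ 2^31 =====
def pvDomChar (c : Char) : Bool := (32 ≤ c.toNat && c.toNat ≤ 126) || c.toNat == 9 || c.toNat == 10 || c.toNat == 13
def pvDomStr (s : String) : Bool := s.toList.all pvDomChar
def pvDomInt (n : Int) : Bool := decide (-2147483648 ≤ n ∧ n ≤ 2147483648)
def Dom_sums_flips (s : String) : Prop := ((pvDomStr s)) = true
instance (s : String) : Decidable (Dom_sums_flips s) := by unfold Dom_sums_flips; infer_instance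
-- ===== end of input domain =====

-- B replaces A's staged computation (prefix-sum array, max pass, two opposite-direction
-- index loops, final sort) by ONE loop that maintains the candidate flip lists themselves
-- online (y's up to the best prefix end, pending y's, x's after it, all x's); no second
-- scan over the string and no sort remain. Objective: simpler decomposition.

-- ===== PORT A =====
-- the loop 'for i in range(1, len(s)): sums[i] = sums[i-1] ± 1' (each cell depends on the previous one)
def pvSumsTail : List Char → Int → List Int
  | [], _ => []
  | c :: rest, prev =>
      let v := if c = 'x' then prev + 1 else prev - 1
      v :: pvSumsTail rest v

def sums_flips (s : String) : List Int :=
  let l := s.toList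
  if l.length ≤ 1 then []   -- Python returns the int 0 here (not a list); excluded by Pre_
  else
    match l with
    | [] => []
    | c0 :: rest =>
      let s0 : Int := if c0 = 'x' then 1 else -1
      let sums := s0 :: pvSumsTail rest s0
      let mm := (PySem.List.enumerate sums).foldl
        (fun (st : Int × Int) iv => if iv.2 > st.1 then (iv.2, iv.1) else st) (s0, 0)
      let m := mm.1
      let mp := mm.2
      let flips : List Int :=
        if m > 0 then
          let f1 := (PySem.List.pyRange 0 (mp + 1) 1).foldl
            (fun acc j => if PySem.List.pyGetD l j ' ' = 'y' then acc ++ [j] else acc) []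
          (PySem.List.pyRange ((l.length : Int) - 1) mp (-1)).foldl
            (fun acc j => if PySem.List.pyGetD l j ' ' = 'x' then acc ++ [j] else acc) f1
        else if m < 0 then
          (PySem.List.pyRange 0 (l.length : Int) 1).foldl
            (fun acc j => if PySem.List.pyGetD l j ' ' = 'x' then acc ++ [j] else acc) []
        else []
      PySem.List.sorted flips (fun x => x) false

-- ===== PORT B =====
-- the loop state of Source B: (bal, m, ys, pend, xs_after, xs_all)
structure PvBSt where
  bal : Int
  m : Option Int
  ys : List Int
  pend : List Int
  xa : List Int
  xall : List Int
deriving Repr, DecidableEq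

-- Source B's single for-loop over enumerate(s)
def pvLoopB : List (Int × Char) → PvBSt → PvBSt
  | [], st => st
  | (i, c) :: rest, st =>
    let st1 :=
      if c = 'x' then
        { st with bal := st.bal + 1, xall := st.xall ++ [i], xa := st.xa ++ [i] }
      else
        { st with bal := st.bal - 1, pend := if c = 'y' then st.pend ++ [i] else st.pend }
    let st2 :=
      if (match st1.m with | none => true | some mv => decide (st1.bal > mv)) then
        { st1 with m := some st1.bal, ys := st1.ys ++ st1.pend, pend := [], xa := [] }
      else st1
    pvLoopB rest st2

def sums_flips_alt (s : String) : List Int :=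
  let l := s.toList
  if l.length ≤ 1 then []   -- Python returns the int 0 here (not a list); excluded by Pre_
  else
    let st := pvLoopB (PySem.List.enumerate l) ⟨0, none, [], [], [], []⟩
    match st.m with
    | none => []
    | some m => if m > 0 then st.ys ++ st.xa else if m < 0 then st.xall else []

-- ===== PRECONDITION & SPEC =====
-- Pre_ excludes strings of length ≤ 1, on which the Python returns the int 0 instead of a list.
def Pre_sums_flips (s : String) : Prop := 2 ≤ s.toList.length
instance (s : String) : Decidable (Pre_sums_flips s) := by unfold Pre_sums_flips; infer_instance
def pvWitness_sums_flips : String := "xy"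

def Spec_sums_flips (s : String) (out : List Int) : Prop := out = sums_flips_alt s
instance (s : String) (out : List Int) : Decidable (Spec_sums_flips s out) := by unfold Spec_sums_flips; infer_instance

-- ===== CLAIM (what is proved, stated in full; the proofs are below) =====
def Claim_equal_sums_flips : Prop := ∀ (s : String), Dom_sums_flips s → Pre_sums_flips s → Spec_sums_flips s (sums_flips s)

-- ===== LEMMAS AND PROOFS =====

-- A's max-search step over (value, index) pairs of the sums list
def pvStepA (st : Int × Int) (iv : Int × Int) : Int × Int :=
  if iv.2 > st.1 then (iv.2, iv.1) else st

-- the index returned by A's max fold stays within the enumerated range (or is the initial one)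
lemma pv_fold_mp_range (xs : List Int) (m mp k : Int) :
    ((PySem.List.enumerate xs k).foldl pvStepA (m, mp)).2 = mp ∨
      (k ≤ ((PySem.List.enumerate xs k).foldl pvStepA (m, mp)).2 ∧
       ((PySem.List.enumerate xs k).foldl pvStepA (m, mp)).2 < k + xs.length) := by
  induction xs generalizing m mp k with
  | nil => simp [PySem.List.enumerate_nil]
  | cons v xs ih =>
    simp only [PySem.List.enumerate_cons, List.foldl_cons, List.length_cons]
    by_cases h : v > m
    · rcases ih v k (k + 1) with h1 | h1 <;> simp [pvStepA, h] at h1 ⊢ <;> omega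
    · rcases ih m mp (k + 1) with h1 | h1 <;> simp [pvStepA, h] at h1 ⊢ <;> omega

-- either no element beat the seed (the fold returns its seed) or the max strictly grew
-- and its place lies at or after the start of the enumerated range
lemma pv_foldA_cases (xs : List Int) (m j k : Int) :
    ((PySem.List.enumerate xs k).foldl pvStepA (m, j)) = (m, j) ∨
      (m < ((PySem.List.enumerate xs k).foldl pvStepA (m, j)).1 ∧
       k ≤ ((PySem.List.enumerate xs k).foldl pvStepA (m, j)).2) := by
  induction xs generalizing m j k with
  | nil => simp [PySem.List.enumerate_nil]
  | cons v xs ih =>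
    simp only [PySem.List.enumerate_cons, List.foldl_cons]
    by_cases h : v > m
    · rcases ih v k (k + 1) with h1 | h1
      · simp [pvStepA, h, h1]
      · simp [pvStepA, h]; omega
    · rcases ih m j (k + 1) with h1 | h1
      · simp [pvStepA, h, h1]
      · simp [pvStepA, h]; omega

lemma pvSumsTail_length (rest : List Char) (prev : Int) :
    (pvSumsTail rest prev).length = rest.length := by
  induction rest generalizing prev with
  | nil => rfl
  | cons c rest ih => simp [pvSumsTail, ih]

lemma pv_beq_decide (a b : Char) : (a == b) = decide (a = b) := by
  by_cases h : a = b <;> simp [h]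

-- filters describing Source B's four lists, as maps over enumerate
def pvYle (t : List Char) (k P : Int) : List Int :=
  ((PySem.List.enumerate t k).filter (fun ic => decide (ic.1 ≤ P) && decide (ic.2 = 'y'))).map (·.1)
def pvYgt (t : List Char) (k P : Int) : List Int :=
  ((PySem.List.enumerate t k).filter (fun ic => decide (P < ic.1) && decide (ic.2 = 'y'))).map (·.1)
def pvXgt (t : List Char) (k P : Int) : List Int :=
  ((PySem.List.enumerate t k).filter (fun ic => decide (P < ic.1) && decide (ic.2 = 'x'))).map (·.1)
def pvXall (t : List Char) (k : Int) : List Int :=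
  ((PySem.List.enumerate t k).filter (fun ic => decide (ic.2 = 'x'))).map (·.1)

lemma pv_ite_and_left {P Q : Prop} [Decidable P] [Decidable Q] (h : P) (a b : List Int) :
    (if P ∧ Q then a else b) = if Q then a else b := by
  by_cases hq : Q <;> simp [h, hq]

lemma pv_ite_and_left_neg {P Q : Prop} [Decidable P] [Decidable Q] (h : ¬ P) (a b : List Int) :
    (if P ∧ Q then a else b) = b := by
  simp [h]

lemma pvYle_cons (c : Char) (t : List Char) (k P : Int) :
    pvYle (c :: t) k P = (if k ≤ P ∧ c = 'y' then [k] else []) ++ pvYle t (k + 1) P := by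
  by_cases h1 : k ≤ P <;> by_cases h2 : c = 'y' <;>
    simp [pvYle, PySem.List.enumerate_cons, h1, h2]

lemma pvYgt_cons (c : Char) (t : List Char) (k P : Int) :
    pvYgt (c :: t) k P = (if P < k ∧ c = 'y' then [k] else []) ++ pvYgt t (k + 1) P := by
  by_cases h1 : P < k <;> by_cases h2 : c = 'y' <;>
    simp [pvYgt, PySem.List.enumerate_cons, h1, h2]

lemma pvXgt_cons (c : Char) (t : List Char) (k P : Int) :
    pvXgt (c :: t) k P = (if P < k ∧ c = 'x' then [k] else []) ++ pvXgt t (k + 1) P := by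
  by_cases h1 : P < k <;> by_cases h2 : c = 'x' <;>
    simp [pvXgt, PySem.List.enumerate_cons, h1, h2]

lemma pvXall_cons (c : Char) (t : List Char) (k : Int) :
    pvXall (c :: t) k = (if c = 'x' then [k] else []) ++ pvXall t (k + 1) := by
  by_cases h2 : c = 'x' <;>
    simp [pvXall, PySem.List.enumerate_cons, h2]

lemma pvYle_empty (t : List Char) (k P : Int) (h : P < k) : pvYle t k P = [] := by
  induction t generalizing k with
  | nil => simp [pvYle, PySem.List.enumerate_nil]
  | cons c t ih =>
    rw [pvYle_cons, ih (k + 1) (by omega), if_neg (by intro hx; omega)]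
    simp

-- main invariant: after the first iteration, Source B's loop computes exactly the filters
-- determined by A's (max, max_place) fold over the prefix sums of the remaining suffix
lemma pvLoopB_spec (t : List Char) (k bal m j : Int) (ys pend xa xall : List Int)
    (hj : j < k) :
    pvLoopB (PySem.List.enumerate t k) ⟨bal, some m, ys, pend, xa, xall⟩ =
      { bal := bal + (t.map fun c => if c = 'x' then (1:Int) else -1).sum,
        m := some ((PySem.List.enumerate (pvSumsTail t bal) k).foldl pvStepA (m, j)).1,
        ys := ys ++ (if m < ((PySem.List.enumerate (pvSumsTail t bal) k).foldl pvStepA (m, j)).1 then pend else [])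
              ++ pvYle t k ((PySem.List.enumerate (pvSumsTail t bal) k).foldl pvStepA (m, j)).2,
        pend := (if m < ((PySem.List.enumerate (pvSumsTail t bal) k).foldl pvStepA (m, j)).1 then [] else pend)
              ++ pvYgt t k ((PySem.List.enumerate (pvSumsTail t bal) k).foldl pvStepA (m, j)).2,
        xa := (if m < ((PySem.List.enumerate (pvSumsTail t bal) k).foldl pvStepA (m, j)).1 then [] else xa)
              ++ pvXgt t k ((PySem.List.enumerate (pvSumsTail t bal) k).foldl pvStepA (m, j)).2,
        xall := xall ++ pvXall t k } := by
  induction t generalizing k bal m j ys pend xa xall with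
  | nil =>
    simp [PySem.List.enumerate_nil, pvLoopB, pvSumsTail, pvYle, pvYgt, pvXgt, pvXall]
  | cons c t ih =>
    have hsums : pvSumsTail (c :: t) bal =
        (if c = 'x' then bal + 1 else bal - 1) ::
          pvSumsTail t (if c = 'x' then bal + 1 else bal - 1) := by
      by_cases hc : c = 'x' <;> simp [pvSumsTail, hc]
    set bal' : Int := if c = 'x' then bal + 1 else bal - 1 with hbal'
    have hfold : (PySem.List.enumerate (pvSumsTail (c :: t) bal) k).foldl pvStepA (m, j) =
        (PySem.List.enumerate (pvSumsTail t bal') (k + 1)).foldl pvStepA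
          (if bal' > m then (bal', k) else (m, j)) := by
      rw [hsums, PySem.List.enumerate_cons, List.foldl_cons]
      by_cases h : bal' > m <;> simp [pvStepA, h]
    have hbalsum : bal' + (t.map fun c => if c = 'x' then (1:Int) else -1).sum
        = bal + ((c :: t).map fun c => if c = 'x' then (1:Int) else -1).sum := by
      by_cases hc : c = 'x' <;> simp [hc, hbal'] <;> ring
    by_cases hup : bal' > m
    · -- new maximum at index k
      have hst : pvLoopB (PySem.List.enumerate (c :: t) k) ⟨bal, some m, ys, pend, xa, xall⟩ =
          pvLoopB (PySem.List.enumerate t (k + 1))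
            ⟨bal', some bal', ys ++ (pend ++ if c = 'y' then [k] else []),
             [], [], xall ++ (if c = 'x' then [k] else [])⟩ := by
        by_cases hc : c = 'x'
        · have hb : bal' = bal + 1 := by rw [hbal', if_pos hc]
          have hcy : ¬ (c = 'y') := by rw [hc]; decide
          rw [hb] at hup
          simp [PySem.List.enumerate_cons, pvLoopB, hc, hb, hup]
        · have hb : bal' = bal - 1 := by rw [hbal', if_neg hc]
          rw [hb] at hup
          by_cases hcy : c = 'y' <;>
            simp [PySem.List.enumerate_cons, pvLoopB, hc, hcy, hb, hup]
      rw [hst, ih (k + 1) bal' bal' k _ _ _ _ (by omega), hfold, if_pos hup]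
      set F := List.foldl pvStepA (bal', k) (PySem.List.enumerate (pvSumsTail t bal') (k + 1)) with hF
      have h1 := pv_foldA_cases (pvSumsTail t bal') bal' k (k + 1)
      rw [← hF] at h1
      have hmlt : m < F.1 := by
        rcases h1 with h1 | h1
        · rw [h1]; exact hup
        · omega
      have hkle : k ≤ F.2 := by
        rcases h1 with h1 | h1
        · rw [h1]
        · omega
      have hnlt : ¬ F.2 < k := by omega
      simp only [PvBSt.mk.injEq]
      refine ⟨hbalsum, trivial, ?_, ?_, ?_, ?_⟩
      · rw [ite_self, if_pos hmlt, pvYle_cons, pv_ite_and_left hkle]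
        simp [List.append_assoc]
      · rw [ite_self, if_pos hmlt, pvYgt_cons, pv_ite_and_left_neg hnlt]
        simp
      · rw [ite_self, if_pos hmlt, pvXgt_cons, pv_ite_and_left_neg hnlt]
        simp
      · rw [pvXall_cons]; simp
    · -- no new maximum at index k
      have hst : pvLoopB (PySem.List.enumerate (c :: t) k) ⟨bal, some m, ys, pend, xa, xall⟩ =
          pvLoopB (PySem.List.enumerate t (k + 1))
            ⟨bal', some m, ys, pend ++ (if c = 'y' then [k] else []),
             xa ++ (if c = 'x' then [k] else []), xall ++ (if c = 'x' then [k] else [])⟩ := by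
        by_cases hc : c = 'x'
        · have hb : bal' = bal + 1 := by rw [hbal', if_pos hc]
          have hcy : ¬ (c = 'y') := by rw [hc]; decide
          rw [hb] at hup
          simp [PySem.List.enumerate_cons, pvLoopB, hc, hb, hup]
        · have hb : bal' = bal - 1 := by rw [hbal', if_neg hc]
          rw [hb] at hup
          by_cases hcy : c = 'y' <;>
            simp [PySem.List.enumerate_cons, pvLoopB, hc, hcy, hb, hup]
      rw [hst, ih (k + 1) bal' m j _ _ _ _ (by omega), hfold, if_neg hup]
      set F := List.foldl pvStepA (m, j) (PySem.List.enumerate (pvSumsTail t bal') (k + 1)) with hF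
      have h1 := pv_foldA_cases (pvSumsTail t bal') m j (k + 1)
      rw [← hF] at h1
      rcases h1 with h1 | h1
      · -- the seed survives: result (m, j), j < k
        rw [h1]
        have hnm : ¬ m < m := by omega
        have hjk : j < k := hj
        simp only [PvBSt.mk.injEq]
        refine ⟨hbalsum, trivial, ?_, ?_, ?_, ?_⟩
        · rw [if_neg hnm, if_neg hnm, pvYle_cons, pv_ite_and_left_neg (by omega : ¬ k ≤ j)]
          simp
        · rw [if_neg hnm, if_neg hnm, pvYgt_cons, pv_ite_and_left hjk]
          simp [List.append_assoc]
        · rw [if_neg hnm, if_neg hnm, pvXgt_cons, pv_ite_and_left hjk]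
          simp [List.append_assoc]
        · rw [pvXall_cons]; simp
      · -- a later element wins: m < M and k + 1 ≤ P
        have hmlt : m < F.1 := h1.1
        have hkle : k ≤ F.2 := by omega
        have hnlt : ¬ F.2 < k := by omega
        simp only [PvBSt.mk.injEq]
        refine ⟨hbalsum, trivial, ?_, ?_, ?_, ?_⟩
        · rw [if_pos hmlt, if_pos hmlt, pvYle_cons, pv_ite_and_left hkle]
          simp [List.append_assoc]
        · rw [if_pos hmlt, if_pos hmlt, pvYgt_cons, pv_ite_and_left_neg hnlt]
          simp
        · rw [if_pos hmlt, if_pos hmlt, pvXgt_cons, pv_ite_and_left_neg hnlt]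
          simp
        · rw [pvXall_cons]; simp

-- the m < 0 branch of A: its ascending append loop, sorted, is the all-'x' filter
lemma pv_neg_case (l : List Char) :
    PySem.List.sorted
      (List.foldl (fun acc j => if PySem.List.pyGetD l j ' ' = 'x' then acc ++ [j] else acc) []
        (PySem.List.pyRange 0 (l.length : Int))) (fun x => x)
    = List.map (fun x => x.1) (List.filter (fun ic => ic.2 == 'x') (PySem.List.enumerate l)) := by
  rw [PySem.List.foldl_append_ite_eq_filter (fun j => PySem.List.pyGetD l j ' ' = 'x'), List.nil_append]
  rw [PySem.List.sorted_eq_self_of_pairwise _ _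
    (((PySem.List.pairwise_lt_pyRange_one 0 (l.length : Int)).filter _).imp le_of_lt)]
  rw [PySem.List.enumerate_eq_map_pyRange l ' ', List.filter_map, List.map_map]
  simp only [PySem.List.len, Function.comp_def, pv_beq_decide]
  exact (List.map_id _).symm

-- the m > 0 branch of A: the two while loops plus the sort give the split filter
lemma pv_pos_case (l : List Char) (P : Int) (h0 : 0 ≤ P) (hn : P < (l.length : Int)) :
    PySem.List.sorted
      (List.foldl (fun acc j => if PySem.List.pyGetD l j ' ' = 'x' then acc ++ [j] else acc)
        (List.foldl (fun acc j => if PySem.List.pyGetD l j ' ' = 'y' then acc ++ [j] else acc) []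
          (PySem.List.pyRange 0 (P + 1)))
        (PySem.List.pyRange ((l.length : Int) - 1) P (-1)))
      (fun x => x)
    = List.map (fun x => x.1)
        (List.filter (fun ic => if ic.1 ≤ P then ic.2 == 'y' else ic.2 == 'x')
          (PySem.List.enumerate l)) := by
  rw [PySem.List.foldl_append_ite_eq_filter (fun j => PySem.List.pyGetD l j ' ' = 'y'), List.nil_append]
  rw [PySem.List.foldl_append_ite_eq_filter (fun j => PySem.List.pyGetD l j ' ' = 'x')]
  rw [PySem.List.pyRange_neg_one_eq_reverse, show ((l.length : Int) - 1) + 1 = (l.length : Int) by ring]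
  rw [List.filter_reverse]
  set F1 := (PySem.List.pyRange 0 (P+1)).filter (fun j => decide (PySem.List.pyGetD l j ' ' = 'y')) with hF1
  set R := (PySem.List.pyRange (P+1) (l.length : Int)).filter
      (fun j => decide (PySem.List.pyGetD l j ' ' = 'x')) with hR
  have hsorted : PySem.List.sorted (F1 ++ R.reverse) (fun x => x) = F1 ++ R := by
    apply PySem.List.sorted_eq_of_perm_of_pairwise_lt
    · exact List.Perm.append_left F1 R.reverse_perm.symm
    · rw [List.pairwise_append]
      refine ⟨(PySem.List.pairwise_lt_pyRange_one 0 (P+1)).filter _,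
              (PySem.List.pairwise_lt_pyRange_one (P+1) (l.length : Int)).filter _, ?_⟩
      intro a ha b hb
      have h1 := (PySem.List.mem_pyRange_one.mp (List.mem_filter.mp ha).1).2
      have h2 := (PySem.List.mem_pyRange_one.mp (List.mem_filter.mp hb).1).1
      omega
  rw [hsorted]
  rw [PySem.List.enumerate_eq_map_pyRange l ' ', List.filter_map, List.map_map]
  simp only [PySem.List.len, Function.comp_def]
  rw [show (PySem.List.pyRange 0 (l.length : Int))
        = PySem.List.pyRange 0 (P+1) ++ PySem.List.pyRange (P+1) (l.length : Int) from
      PySem.List.pyRange_one_append 0 (P+1) (l.length : Int) (by omega) (by omega)]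
  rw [List.filter_append, List.map_append, List.map_id', List.map_id']
  congr 1
  · apply List.filter_congr
    intro j hj
    have := PySem.List.mem_pyRange_one.mp hj
    rw [if_pos (by omega : j ≤ P), pv_beq_decide]
  · apply List.filter_congr
    intro j hj
    have := PySem.List.mem_pyRange_one.mp hj
    rw [if_neg (by omega : ¬ j ≤ P), pv_beq_decide]

-- the split filter equals B's ys-part followed by its xs_after-part
lemma pv_filter_split (t : List Char) (k P : Int) :
    ((PySem.List.enumerate t k).filter
        (fun ic => if ic.1 ≤ P then ic.2 == 'y' else ic.2 == 'x')).map (·.1)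
      = pvYle t k P ++ pvXgt t k P := by
  induction t generalizing k with
  | nil => simp [PySem.List.enumerate_nil, pvYle, pvXgt]
  | cons c t ih =>
    by_cases hk : k ≤ P
    · rw [pvYle_cons, pvXgt_cons, pv_ite_and_left hk, pv_ite_and_left_neg (by omega : ¬ P < k)]
      by_cases hc : c = 'y' <;>
        simp [PySem.List.enumerate_cons, hk, hc, ih (k + 1)]
    · rw [pvYle_empty _ _ _ (by omega), pvXgt_cons,
        pv_ite_and_left (by omega : P < k), List.nil_append]
      by_cases hc : c = 'x' <;>
        simp [PySem.List.enumerate_cons, hk, hc, ih (k + 1),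
          pvYle_empty t (k + 1) P (by omega)]

-- Source B's first iteration (m is None, so the maximum is always taken)
lemma pv_first_step (c0 : Char) (rest : List Char) :
    pvLoopB (PySem.List.enumerate (c0 :: rest)) ⟨0, none, [], [], [], []⟩ =
      pvLoopB (PySem.List.enumerate rest 1)
        ⟨(if c0 = 'x' then 1 else -1), some (if c0 = 'x' then 1 else -1),
         (if c0 = 'y' then [0] else []), [], [], (if c0 = 'x' then [0] else [])⟩ := by
  by_cases hc : c0 = 'x'
  · simp [PySem.List.enumerate_cons, pvLoopB, hc]
  · by_cases hcy : c0 = 'y' <;> simp [PySem.List.enumerate_cons, pvLoopB, hc, hcy]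

-- ===== VERDICT (by name: the statement is the Claim_ definition above) =====
theorem sums_flips_spec : Claim_equal_sums_flips := by
  intro s _ hpre
  have hpre2 : 2 ≤ s.toList.length := hpre
  unfold Spec_sums_flips sums_flips sums_flips_alt
  generalize hgen : s.toList = l at *
  cases l with
  | nil => simp at hpre2
  | cons c0 rest =>
    have hlen : ¬((c0 :: rest).length ≤ 1) := by simp only [List.length_cons] at hpre2 ⊢; omega
    simp only [if_neg hlen]
    have hAlam : (fun (st : Int × Int) (iv : Int × Int) =>
        if iv.2 > st.1 then (iv.2, iv.1) else st) = pvStepA := rfl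
    rw [hAlam, pv_first_step]
    set s0 : Int := if c0 = 'x' then 1 else -1 with hs0
    have hA0 : List.foldl pvStepA (s0, 0) (PySem.List.enumerate (s0 :: pvSumsTail rest s0)) =
        List.foldl pvStepA (s0, 0) (PySem.List.enumerate (pvSumsTail rest s0) 1) := by
      rw [PySem.List.enumerate_cons]
      simp [pvStepA]
    rw [hA0, pvLoopB_spec rest 1 s0 s0 0 _ _ _ _ (by omega)]
    set F := List.foldl pvStepA (s0, 0) (PySem.List.enumerate (pvSumsTail rest s0) 1) with hF
    have hrange := pv_fold_mp_range (pvSumsTail rest s0) s0 0 1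
    rw [← hF, pvSumsTail_length] at hrange
    have h0P : 0 ≤ F.2 := by rcases hrange with h | h <;> omega
    have hPn : F.2 < ((c0 :: rest).length : Int) := by
      simp only [List.length_cons]
      push_cast
      rcases hrange with h | h <;> omega
    simp only [ite_self]
    by_cases hpos : F.1 > 0
    · simp only [if_pos hpos]
      rw [pv_pos_case (c0 :: rest) F.2 h0P hPn]
      rw [PySem.List.enumerate_cons, List.filter_cons]
      have hhead : (if (0:Int) ≤ F.2 then c0 == 'y' else c0 == 'x') = (c0 == 'y') := by
        rw [if_pos h0P]
      rw [hhead, show ((0:Int) + 1) = (1:Int) from rfl]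
      by_cases hc : c0 = 'y'
      · rw [if_pos (by simp [hc] : (c0 == 'y') = true), List.map_cons, pv_filter_split rest 1 F.2]
        simp [hc]
      · rw [if_neg (by simp [hc] : ¬ (c0 == 'y') = true), pv_filter_split rest 1 F.2]
        simp [hc]
    · simp only [if_neg hpos]
      by_cases hneg : F.1 < 0
      · simp only [if_pos hneg]
        rw [pv_neg_case (c0 :: rest), PySem.List.enumerate_cons, List.filter_cons,
          show ((0:Int) + 1) = (1:Int) from rfl]
        by_cases hc : c0 = 'x'
        · rw [if_pos (by simp [hc] : (c0 == 'x') = true), List.map_cons]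
          simp [hc, pvXall, pv_beq_decide]
        · rw [if_neg (by simp [hc] : ¬ (c0 == 'x') = true)]
          simp [hc, pvXall, pv_beq_decide]
      · simp only [if_neg hneg]
        exact PySem.List.sorted_eq_self_of_pairwise [] _ (by simp)
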